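-- pv_equiv track=rewrite | github.com/colinxy/ProjectEuler | Python/project_euler148.py | not_div7_tri
-- ===== SOURCE A (Python) =====
-- from math import prod
--
-- def not_div7_row(row_base7):
--     # row_base7 is the row index written in base 7
--     # find the number of entries not divisible by 7 in row
--     return prod(i + 1 for i in row_base7)
--
-- def base7_add1(base7):
--     """
--     base7 is reversed: the least significant digit goes first
--     """
--     base7[0] += 1
--     for d in range(len(base7)):
--         if base7[d] < 7:
--             break
--
--         # base7[d] == 7
--         # carry-over
--         base7[d] = 0
--         if d < len(base7) - 1:
--             base7[d + 1] += 1
--         else: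
--             base7.append(1)
--
--     return base7
--
-- def not_div7_tri(n):
--     count = 0
--     # row number in base 7
--     row_base7 = [0]
--     for row in range(n):
--         curr_count = not_div7_row(row_base7)
--         count += curr_count
--
--         row_base7 = base7_add1(row_base7)
--
--     return count
-- ===== SOURCE B (Python) =====
-- def not_div7_tri(n):
--     # Base-7 digit DP: go(m) returns (S(m), f(m)) where f(m) is the product of
--     # (digit+1) over m's base-7 digits and S(m) = sum of f(row) for row < m,
--     # using S(7*q + r) = 28*S(q) + f(q) * r*(r+1)//2.
--     def go(m):
--         if m <= 0:
--             return 0, 1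
--         q, r = divmod(m, 7)
--         s, f = go(q)
--         return 28 * s + f * (r * (r + 1) // 2), f * (r + 1)
--     if n <= 0:
--         return 0
--     return go(n)[0]
-- ===== Notes on version B (the rewrite author's own statement) =====
-- stated objective: faster
-- what changed: Replaces A's row-by-row loop (incrementing a base-7 counter and multiplying its digits for each of the n rows) with a base-7 digit recursion using the block identity S(7q+r) = 28*S(q) + f(q)*r(r+1)/2, so only O(log n) arithmetic steps are done.
import Mathlib
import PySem

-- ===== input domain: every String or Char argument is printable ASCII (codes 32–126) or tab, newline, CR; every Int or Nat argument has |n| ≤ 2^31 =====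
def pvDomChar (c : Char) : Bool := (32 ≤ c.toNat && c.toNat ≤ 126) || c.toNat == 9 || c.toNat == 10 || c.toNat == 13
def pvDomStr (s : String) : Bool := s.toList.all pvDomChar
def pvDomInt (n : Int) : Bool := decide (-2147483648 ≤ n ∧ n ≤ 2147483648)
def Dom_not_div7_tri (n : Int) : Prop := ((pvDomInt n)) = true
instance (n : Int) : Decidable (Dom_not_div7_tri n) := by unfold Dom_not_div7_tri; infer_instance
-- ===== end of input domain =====

-- B replaces A's per-row loop by a base-7 digit recursion (objective: faster, asymptotic).

-- ===== PORT A =====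
-- prod(i + 1 for i in row_base7)
def notDiv7Row (row : List Int) : Int := row.foldl (fun a i => a * (i + 1)) 1

-- the carry loop of base7_add1: d is the current digit's value, rest the digits above it
def carryStep (d : Int) : List Int → List Int
  | [] => if d < 7 then [d] else [0, 1]
  | e :: rest => if d < 7 then d :: e :: rest else 0 :: carryStep (e + 1) rest

-- base7_add1; the [] case is unreachable in A (the list is always nonempty)
def base7Add1 : List Int → List Int
  | [] => []
  | d :: rest => carryStep (d + 1) rest

def not_div7_tri (n : Int) : Int :=
  ((PySem.List.pyRange 0 n 1).foldl
      (fun st _ => (st.1 + notDiv7Row st.2, base7Add1 st.2)) ((0 : Int), [(0 : Int)])).1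

-- ===== PORT B =====
-- go(m) of Source B: returns the pair (S(m), f(m))
def goB (m : Int) : Int × Int :=
  if h : m ≤ 0 then (0, 1)
  else
    let q := PySem.Int.floordiv m 7
    let r := PySem.Int.mod m 7
    let p := goB q
    (28 * p.1 + p.2 * PySem.Int.floordiv (r * (r + 1)) 2, p.2 * (r + 1))
termination_by m.toNat
decreasing_by
  have : PySem.Int.floordiv m 7 = m / 7 := PySem.Int.floordiv_eq_ediv_of_pos (by omega)
  rw [this]
  omega

def not_div7_tri_alt (n : Int) : Int :=
  if n ≤ 0 then 0 else (goB n).1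

-- ===== PRECONDITION & SPEC =====
def Spec_not_div7_tri (n : Int) (out : Int) : Prop := out = not_div7_tri_alt n
instance (n : Int) (out : Int) : Decidable (Spec_not_div7_tri n out) := by unfold Spec_not_div7_tri; infer_instance

-- ===== CLAIM (what is proved, stated in full; the proofs are below) =====
def Claim_equal_not_div7_tri : Prop := ∀ (n : Int), Dom_not_div7_tri n → Spec_not_div7_tri n (not_div7_tri n)

-- ===== LEMMAS AND PROOFS =====

-- f(k): product of (digit+1) over the base-7 digits of k
def F (k : Nat) : Int :=
  if h : k = 0 then 1 else (((k % 7 : Nat) : Int) + 1) * F (k / 7)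
termination_by k
decreasing_by exact Nat.div_lt_self (Nat.pos_of_ne_zero h) (by norm_num)

-- S(k) = sum of F over rows < k
def S : Nat → Int
  | 0 => 0
  | k + 1 => S k + F k

-- reversed base-7 digit list of k, as A maintains it
def rep (k : Nat) : List Int :=
  if k < 7 then [(k : Int)] else ((k % 7 : Nat) : Int) :: rep (k / 7)
termination_by k
decreasing_by exact Nat.div_lt_self (by omega) (by norm_num)

theorem carryStep_nil (d : Int) : carryStep d [] = if d < 7 then [d] else [0, 1] := rfl

theorem carryStep_cons (d e : Int) (rest : List Int) :
    carryStep d (e :: rest) = if d < 7 then d :: e :: rest else 0 :: carryStep (e + 1) rest := rfl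

theorem F_zero : F 0 = 1 := by rw [F]; simp

theorem F_succ (k : Nat) (h : k ≠ 0) : F k = (((k % 7 : Nat) : Int) + 1) * F (k / 7) := by
  rw [F]; simp [h]

theorem F_block (q j : Nat) (hj : j < 7) : F (7 * q + j) = ((j : Int) + 1) * F q := by
  by_cases h0 : 7 * q + j = 0
  · have hq : q = 0 := by omega
    have hj0 : j = 0 := by omega
    subst hq; subst hj0; simp [F_zero]
  · rw [F_succ _ h0]
    have h1 : (7 * q + j) % 7 = j := by omega
    have h2 : (7 * q + j) / 7 = q := by omega
    rw [h1, h2]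

theorem S_add (a r : Nat) : S (a + r) = S a + ∑ j ∈ Finset.range r, F (a + j) := by
  induction r with
  | zero => simp
  | succ r ih =>
    rw [show a + (r + 1) = (a + r) + 1 from by omega]
    show S (a + r) + F (a + r) = _
    rw [ih, Finset.sum_range_succ]
    ring

theorem S_mul7 (q : Nat) : S (7 * q) = 28 * S q := by
  induction q with
  | zero => simp [S]
  | succ q ih =>
    rw [show 7 * (q + 1) = 7 * q + 7 from by ring, S_add]
    simp only [Finset.sum_range_succ, Finset.sum_range_zero]
    rw [F_block q 0 (by norm_num), F_block q 1 (by norm_num), F_block q 2 (by norm_num),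
      F_block q 3 (by norm_num), F_block q 4 (by norm_num), F_block q 5 (by norm_num),
      F_block q 6 (by norm_num), ih, show S (q + 1) = S q + F q from rfl]
    push_cast
    ring

theorem sum_one_to (r : Nat) : ∑ j ∈ Finset.range r, ((j : Int) + 1) = (r : Int) * (r + 1) / 2 := by
  induction r with
  | zero => simp
  | succ r ih =>
    obtain ⟨t, ht⟩ : ∃ t : Int, (r : Int) * (r + 1) = 2 * t := by
      rcases Int.even_mul_succ_self (r : Int) with ⟨t, ht⟩
      exact ⟨t, by omega⟩
    rw [Finset.sum_range_succ, ih]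
    push_cast
    have h2 : ((r : Int) + 1) * ((r : Int) + 1 + 1) = 2 * (t + (r + 1)) := by
      rw [show ((r : Int) + 1) * ((r : Int) + 1 + 1) = (r : Int) * (r + 1) + 2 * (r + 1) from by ring, ht]
      ring
    rw [ht, h2, Int.mul_ediv_cancel_left _ (by norm_num), Int.mul_ediv_cancel_left _ (by norm_num)]
    try ring

theorem S_block (q r : Nat) (hr : r < 7) :
    S (7 * q + r) = 28 * S q + F q * ((r : Int) * (r + 1) / 2) := by
  rw [S_add, S_mul7]
  have hs : ∑ j ∈ Finset.range r, F (7 * q + j)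
      = (∑ j ∈ Finset.range r, ((j : Int) + 1)) * F q := by
    rw [Finset.sum_mul]
    exact Finset.sum_congr rfl fun j hj =>
      F_block q j (lt_of_lt_of_le (Finset.mem_range.mp hj) (by omega))
  rw [hs, sum_one_to]
  ring

theorem goB_eq (m : Int) (hm : 0 ≤ m) : goB m = (S m.toNat, F m.toNat) := by
  by_cases h : m ≤ 0
  · have : m = 0 := by omega
    subst this
    rw [goB]
    simp [S, F_zero]
  · rw [goB]
    simp only [h, dite_false]
    have hq : PySem.Int.floordiv m 7 = m / 7 := PySem.Int.floordiv_eq_ediv_of_pos (by norm_num)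
    have hrr : PySem.Int.mod m 7 = m % 7 := PySem.Int.mod_eq_emod_of_pos (by norm_num)
    have hq0 : 0 ≤ m / 7 := by positivity
    have ih : goB (PySem.Int.floordiv m 7) = (S (m / 7).toNat, F (m / 7).toNat) := by
      rw [hq]; exact goB_eq (m / 7) hq0
    rw [ih]
    simp only [hrr]
    have hfd : PySem.Int.floordiv (m % 7 * (m % 7 + 1)) 2 = m % 7 * (m % 7 + 1) / 2 :=
      PySem.Int.floordiv_eq_ediv_of_pos (by norm_num)
    have hrlt : (m % 7).toNat < 7 := by omega
    have hcast : (((m % 7).toNat : Nat) : Int) = m % 7 := by omega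
    have hF : F m.toNat = (m % 7 + 1) * F (m / 7).toNat := by
      rw [F_succ m.toNat (by omega), show m.toNat % 7 = (m % 7).toNat from by omega,
        show m.toNat / 7 = (m / 7).toNat from by omega, hcast]
    have hS : S m.toNat = 28 * S (m / 7).toNat + F (m / 7).toNat * (m % 7 * (m % 7 + 1) / 2) := by
      rw [show m.toNat = 7 * (m / 7).toNat + (m % 7).toNat from by omega, S_block _ _ hrlt, hcast]
    rw [hfd, hS, hF]
    rw [Prod.mk.injEq]
    constructor <;> ring
termination_by m.toNat
decreasing_by omega

theorem rep_ne_nil (k : Nat) : rep k ≠ [] := by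
  rw [rep]
  split <;> simp

theorem foldl_mul_shift (l : List Int) : ∀ a : Int,
    l.foldl (fun a i => a * (i + 1)) a = a * l.foldl (fun a i => a * (i + 1)) 1 := by
  induction l with
  | nil => intro a; simp
  | cons i l ih =>
    intro a
    simp only [List.foldl_cons]
    rw [ih (a * (i + 1)), ih (1 * (i + 1))]
    ring

theorem row_eq (k : Nat) : notDiv7Row (rep k) = F k := by
  rw [rep]
  by_cases h : k < 7
  · simp only [h, if_true]
    by_cases h0 : k = 0
    · subst h0; simp [notDiv7Row, F_zero]
    · rw [F_succ _ h0, show k % 7 = k from by omega, show k / 7 = 0 from by omega, F_zero]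
      simp [notDiv7Row]
  · simp only [h, if_false]
    have ih : notDiv7Row (rep (k / 7)) = F (k / 7) := row_eq (k / 7)
    rw [F_succ _ (by omega)]
    simp only [notDiv7Row, List.foldl_cons] at ih ⊢
    rw [foldl_mul_shift, ih]
    ring
termination_by k
decreasing_by exact Nat.div_lt_self (by omega) (by norm_num)

theorem add1_eq (k : Nat) : base7Add1 (rep k) = rep (k + 1) := by
  by_cases h6 : k < 6
  · have e1 : rep k = [(k : Int)] := by rw [rep]; simp [show k < 7 from by omega]
    have e2 : rep (k + 1) = [((k + 1 : Nat) : Int)] := by rw [rep]; simp [show k + 1 < 7 from by omega]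
    rw [e1, e2]
    show carryStep ((k : Int) + 1) [] = _
    rw [carryStep_nil, if_pos (show (k : Int) + 1 < 7 from by exact_mod_cast (by omega : k + 1 < 7))]
    norm_cast
  · by_cases h7 : k < 7
    · -- k = 6: the single digit overflows and a new digit is appended
      have hk : k = 6 := by omega
      subst hk
      have e1 : rep 6 = [(6 : Int)] := by rw [rep]; norm_num
      have e2 : rep 7 = [(0 : Int), 1] := by rw [rep, rep]; norm_num
      rw [show (6 : Nat) + 1 = 7 from rfl, e1, e2]
      show carryStep ((6 : Int) + 1) [] = _
      rw [carryStep_nil]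
      norm_num
    · -- k ≥ 7
      obtain ⟨e, rest, hq⟩ : ∃ e rest, rep (k / 7) = e :: rest := by
        cases h : rep (k / 7) with
        | nil => exact absurd h (rep_ne_nil _)
        | cons e rest => exact ⟨e, rest, rfl⟩
      have hrepk : rep k = ((k % 7 : Nat) : Int) :: rep (k / 7) := by
        rw [rep]; simp [h7]
      have hrepk1 : rep (k + 1) = (((k + 1) % 7 : Nat) : Int) :: rep ((k + 1) / 7) := by
        rw [rep]; simp [show ¬ k + 1 < 7 from by omega]
      by_cases hm : k % 7 < 6
      · -- no carry beyond the first digit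
        have hlt : ((k % 7 : Nat) : Int) + 1 < 7 := by exact_mod_cast (by omega : k % 7 + 1 < 7)
        rw [hrepk, hq, hrepk1, show (k + 1) % 7 = k % 7 + 1 from by omega,
          show (k + 1) / 7 = k / 7 from by omega, hq]
        show carryStep (((k % 7 : Nat) : Int) + 1) (e :: rest) = _
        rw [carryStep_cons, if_pos hlt]
        norm_cast
      · -- k % 7 = 6: carry propagates into the higher digits
        have hm6 : k % 7 = 6 := by omega
        have hlt : ¬ (((k % 7 : Nat) : Int) + 1 < 7) := by rw [hm6]; norm_num
        have ih : base7Add1 (rep (k / 7)) = rep (k / 7 + 1) := add1_eq (k / 7)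
        rw [hq] at ih
        rw [hrepk, hq, hrepk1, show (k + 1) % 7 = 0 from by omega,
          show (k + 1) / 7 = k / 7 + 1 from by omega]
        show carryStep (((k % 7 : Nat) : Int) + 1) (e :: rest) = _
        rw [carryStep_cons, if_neg hlt]
        show 0 :: carryStep (e + 1) rest = _
        have ih' : carryStep (e + 1) rest = rep (k / 7 + 1) := ih
        rw [ih']
        norm_num
termination_by k
decreasing_by exact Nat.div_lt_self (by omega) (by norm_num)

theorem foldA (k : Nat) : ∀ (j : Nat) (a : Int),
    (PySem.List.pyRange a (a + (k : Int)) 1).foldl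
        (fun st _ => (st.1 + notDiv7Row st.2, base7Add1 st.2)) (S j, rep j)
      = (S (j + k), rep (j + k)) := by
  induction k with
  | zero =>
    intro j a
    rw [show a + ((0 : Nat) : Int) = a from by push_cast; ring,
      PySem.List.pyRange_one_eq_nil le_rfl]
    simp
  | succ k ih =>
    intro j a
    rw [show a + ((k + 1 : Nat) : Int) = a + ((k : Int) + 1) from by push_cast; ring,
      PySem.List.pyRange_one_cons (by omega : a < a + ((k : Int) + 1))]
    simp only [List.foldl_cons]
    have hstep : ((S j + notDiv7Row (rep j), base7Add1 (rep j)) : Int × List Int)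
        = (S (j + 1), rep (j + 1)) := by
      rw [row_eq, add1_eq]
      rfl
    rw [hstep, show a + ((k : Int) + 1) = (a + 1) + (k : Int) from by ring, ih (j + 1) (a + 1),
      show j + 1 + k = j + (k + 1) from by omega]

-- ===== VERDICT (by name: the statement is the Claim_ definition above) =====
theorem not_div7_tri_spec : Claim_equal_not_div7_tri := by
  intro n _
  unfold Spec_not_div7_tri not_div7_tri not_div7_tri_alt
  by_cases h : n ≤ 0
  · rw [PySem.List.pyRange_one_eq_nil h]
    simp [h]
  · simp only [h, if_false]
    rw [goB_eq n (by omega)]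
    have hinit : (((0 : Int), [(0 : Int)]) : Int × List Int) = (S 0, rep 0) := by
      rw [rep]; simp [S]
    have hfold := foldA n.toNat 0 0
    rw [show (0 : Int) + (n.toNat : Int) = n from by omega] at hfold
    rw [hinit, hfold]
    simp
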